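-- pv_equiv track=rewrite | github.com/danihazan/Solving-Sokoban-using-Formal-Verification | models/grid based model/smv_file_generator.py | solvability_condition_string_generator
-- ===== SOURCE A (Python) =====
-- def solvability_condition_string_generator(board):
--     """
--         Input:
--         board: this is a list contsainig the XSB representation of the board
--     Output:
--         Generate the string describing the winning condition
--
--     """
--     solvability_condition = ''
--
--     goal_counter=0
--     # Find number of Goals on board (BOG,POG,GOAL)
--     for i in range(len(board)):
--         for j in range(len(board[0])):
--             if board[i][j] == '.' or board[i][j] == '+' or board[i][j] == '*': #GOAL or POG or BOG
--                 goal_counter+=1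
--     counter=0
--     # Generate String to define solvability- check if all goals are BOG
--     for i in range(len(board)):
--         for j in range(len(board[0])):
--             if board[i][j] == '.' or board[i][j] == '+' or board[i][j] == '*': #GOAL or POG or BOG
--                     counter+=1
--                     if counter < goal_counter:
--                         solvability_condition += f'sokoban_board[{i}][{j}] = BOG & \n\t'  # Not the last '.' in the board
--                     elif counter==goal_counter:
--                         solvability_condition += f'sokoban_board[{i}][{j}] = BOG ;\n'  # Last '.' in the board
--                         break
--         if counter==goal_counter:
--             break
--     return solvability_condition
-- ===== SOURCE B (Python) =====
-- def solvability_condition_string_generator(board):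
--     # Scan the board BACKWARDS, building the string back-to-front: the first goal
--     # seen (the board's last goal) gets the ' ;\n' terminator, every later one is
--     # prepended with ' & \n\t'. No counting pass, no counter, no break logic.
--     out = ''
--     width = len(board[0]) if board else 0
--     for i in range(len(board) - 1, -1, -1):
--         row = board[i]
--         for j in range(width - 1, -1, -1):
--             if row[j] in '.+*':
--                 sep = ' ;\n' if not out else ' & \n\t'
--                 out = f'sokoban_board[{i}][{j}] = BOG' + sep + out
--     return out
-- ===== Notes on version B (the rewrite author's own statement) =====
-- stated objective: alternative
-- what changed: B traverses the board in reverse (last cell first) and builds the string back-to-front, choosing ' ;\n' when the accumulator is still empty and ' & \n\t' otherwise, which removes A's separate goal-counting pass and its running counter/break logic entirely.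
import Mathlib
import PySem

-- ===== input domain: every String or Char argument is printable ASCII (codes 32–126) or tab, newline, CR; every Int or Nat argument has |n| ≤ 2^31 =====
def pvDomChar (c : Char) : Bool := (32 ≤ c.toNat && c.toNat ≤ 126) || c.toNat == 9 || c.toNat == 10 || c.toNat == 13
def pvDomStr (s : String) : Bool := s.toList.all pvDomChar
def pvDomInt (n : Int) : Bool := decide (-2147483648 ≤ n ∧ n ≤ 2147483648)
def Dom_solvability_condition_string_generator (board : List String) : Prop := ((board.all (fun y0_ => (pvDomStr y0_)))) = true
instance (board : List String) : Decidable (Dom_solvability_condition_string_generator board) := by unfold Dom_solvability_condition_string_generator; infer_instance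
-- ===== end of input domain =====

-- B scans the board BACKWARDS and builds the string back-to-front (the first goal met
-- gets the ' ;\n' terminator, later ones are prepended with ' & \n\t'), replacing A's
-- counting pass and running counter/break logic (objective: alternative).

-- shared helper: the f-string 'sokoban_board[{i}][{j}] = BOG' as a char list
def pvEntry (i j : Int) : List Char :=
  "sokoban_board[".toList ++ PySem.Int.toChars i ++ "][".toList ++ PySem.Int.toChars j ++ "] = BOG".toList

-- shared helper: board[i][j] == '.' or '+' or '*'  (B's `c in '.+*'`)
def pvIsGoal (c : Char) : Bool := c == '.' || c == '+' || c == '*'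

-- ===== PORT A =====
-- inner 'for j in range(len(board[0]))' loop of A's second pass, with its break
def pvInner : List (Int × Char) → Int → Nat → Nat → List Char → Nat × List Char
  | [], _, cnt, _, s => (cnt, s)
  | (j, c) :: rest, i, cnt, g, s =>
    if pvIsGoal c then
      if cnt + 1 < g then pvInner rest i (cnt + 1) g (s ++ pvEntry i j ++ " & \n\t".toList)
      else if cnt + 1 = g then (cnt + 1, s ++ pvEntry i j ++ " ;\n".toList)
      else pvInner rest i (cnt + 1) g s
    else pvInner rest i cnt g s

-- outer 'for i in range(len(board))' loop of A's second pass, with its break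
def pvOuter : List (Int × String) → Nat → Nat → Nat → List Char → List Char
  | [], _, _, _, s => s
  | (i, row) :: rest, w, cnt, g, s =>
    let r := pvInner (PySem.List.enumerate (row.toList.take w)) i cnt g s
    if r.1 = g then r.2 else pvOuter rest w r.1 g r.2

def solvability_condition_string_generator (board : List String) : String :=
  let w : Nat := if board.length = 0 then 0 else (board.headD "").toList.length
  let goal_counter : Nat :=
    board.foldl (fun acc row =>
      (row.toList.take w).foldl (fun a c => if pvIsGoal c then a + 1 else a) acc) 0
  String.ofList (pvOuter (PySem.List.enumerate board) w 0 goal_counter [])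

-- ===== PORT B =====
-- one cell of B's reverse scan: prepend the entry, picking the separator by whether
-- the accumulated string is still empty
def pvCellB (i : Int) (acc : List Char) (q : Int × Char) : List Char :=
  if pvIsGoal q.2 then
    pvEntry i q.1 ++ (if acc.isEmpty then " ;\n".toList else " & \n\t".toList) ++ acc
  else acc

def solvability_condition_string_generator_alt (board : List String) : String :=
  let w : Nat := match board with | [] => 0 | r :: _ => r.toList.length
  String.ofList
    ((PySem.List.enumerate board).reverse.foldl (fun acc p =>
      ((PySem.List.enumerate (p.2.toList.take w)).reverse).foldl (pvCellB p.1) acc) [])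

-- ===== PRECONDITION & SPEC =====
-- Pre_ excludes exactly the boards on which A raises IndexError: some row shorter than row 0
-- (A's passes index every row up to len(board[0])); B raises there too.
def Pre_solvability_condition_string_generator (board : List String) : Prop :=
  ∀ r ∈ board, (board.headD "").toList.length ≤ r.toList.length
instance (board : List String) : Decidable (Pre_solvability_condition_string_generator board) := by
  unfold Pre_solvability_condition_string_generator; infer_instance

def pvWitness_solvability_condition_string_generator : List String := ["#.", "*+"]

def Spec_solvability_condition_string_generator (board : List String) (out : String) : Prop := out = solvability_condition_string_generator_alt board
instance (board : List String) (out : String) : Decidable (Spec_solvability_condition_string_generator board out) := by unfold Spec_solvability_condition_string_generator; infer_instance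

-- ===== CLAIM (what is proved, stated in full; the proofs are below) =====
def Claim_equal_solvability_condition_string_generator : Prop := ∀ (board : List String), Dom_solvability_condition_string_generator board → Pre_solvability_condition_string_generator board → Spec_solvability_condition_string_generator board (solvability_condition_string_generator board)

-- ===== LEMMAS AND PROOFS =====

-- the goal coordinates of one enumerated row
def pvRowGoals (i : Int) (cells : List (Int × Char)) : List (Int × Int) :=
  cells.filterMap (fun q => if pvIsGoal q.2 then some (i, q.1) else none)

-- the goal coordinates of the whole (enumerated) board, each row clipped to width w
def pvFlat (w : Nat) (rows : List (Int × String)) : List (Int × Int) :=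
  rows.flatMap (fun p => pvRowGoals p.1 (PySem.List.enumerate (p.2.toList.take w)))

-- the rendered condition for the remaining goal list, given goals already emitted (cnt) and the total (g)
def pvT : List (Int × Int) → Nat → Nat → List Char
  | [], _, _ => []
  | (i, j) :: rest, cnt, g =>
    if cnt + 1 < g then pvEntry i j ++ " & \n\t".toList ++ pvT rest (cnt + 1) g
    else pvEntry i j ++ " ;\n".toList

-- B's back-to-front accumulation over a goal list (head is prepended last)
def pvPre (acc : List Char) (x : Int × Int) : List Char :=
  pvEntry x.1 x.2 ++ (if acc.isEmpty then " ;\n".toList else " & \n\t".toList) ++ acc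

def pvS (gs : List (Int × Int)) (acc : List Char) : List Char :=
  gs.foldr (fun x a => pvPre a x) acc

lemma pvT_cons (i j : Int) (rest : List (Int × Int)) (cnt g : Nat) :
    pvT ((i, j) :: rest) cnt g =
      if cnt + 1 < g then pvEntry i j ++ " & \n\t".toList ++ pvT rest (cnt + 1) g
      else pvEntry i j ++ " ;\n".toList := rfl

lemma pvInner_cons (j : Int) (c : Char) (rest : List (Int × Char)) (i : Int) (cnt g : Nat) (s : List Char) :
    pvInner ((j, c) :: rest) i cnt g s =
      if pvIsGoal c then
        if cnt + 1 < g then pvInner rest i (cnt + 1) g (s ++ pvEntry i j ++ " & \n\t".toList)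
        else if cnt + 1 = g then (cnt + 1, s ++ pvEntry i j ++ " ;\n".toList)
        else pvInner rest i (cnt + 1) g s
      else pvInner rest i cnt g s := rfl

lemma pvOuter_cons (i : Int) (row : String) (rest : List (Int × String)) (w cnt g : Nat) (s : List Char) :
    pvOuter ((i, row) :: rest) w cnt g s =
      if (pvInner (PySem.List.enumerate (row.toList.take w)) i cnt g s).1 = g
      then (pvInner (PySem.List.enumerate (row.toList.take w)) i cnt g s).2
      else pvOuter rest w (pvInner (PySem.List.enumerate (row.toList.take w)) i cnt g s).1 g
             (pvInner (PySem.List.enumerate (row.toList.take w)) i cnt g s).2 := rfl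

lemma pvInner_spec (i : Int) (cells : List (Int × Char)) :
    ∀ cnt g s, cnt + (pvRowGoals i cells).length ≤ g →
      pvInner cells i cnt g s = (cnt + (pvRowGoals i cells).length, s ++ pvT (pvRowGoals i cells) cnt g) := by
  induction cells with
  | nil => intro cnt g s _; simp [pvInner, pvRowGoals, pvT]
  | cons hd tl ih =>
    obtain ⟨j, c⟩ := hd
    intro cnt g s h
    by_cases hc : pvIsGoal c
    · have hrg : pvRowGoals i ((j, c) :: tl) = (i, j) :: pvRowGoals i tl := by
        simp [pvRowGoals, hc]
      rw [hrg] at h ⊢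
      by_cases hlt : cnt + 1 < g
      · rw [pvInner_cons, if_pos hc, if_pos hlt,
          ih (cnt + 1) g (s ++ pvEntry i j ++ " & \n\t".toList) (by simp at h ⊢; omega),
          pvT_cons, if_pos hlt]
        exact Prod.ext_iff.mpr ⟨by simp; omega, by simp [List.append_assoc]⟩
      · have heq : cnt + 1 = g := by simp at h; omega
        have htl : pvRowGoals i tl = [] := by
          have : (pvRowGoals i tl).length = 0 := by simp at h; omega
          exact List.length_eq_zero_iff.mp this
        rw [pvInner_cons, if_pos hc, if_neg hlt, if_pos heq, pvT_cons, if_neg hlt]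
        simp only [htl, List.length_cons, List.length_nil, List.append_assoc]
    · have hrg : pvRowGoals i ((j, c) :: tl) = pvRowGoals i tl := by
        simp [pvRowGoals, hc]
      rw [hrg] at h ⊢
      rw [pvInner_cons, if_neg hc]
      exact ih cnt g s h

lemma pvT_append (gs1 gs2 : List (Int × Int)) :
    ∀ cnt g, cnt + gs1.length < g →
      pvT (gs1 ++ gs2) cnt g = pvT gs1 cnt g ++ pvT gs2 (cnt + gs1.length) g := by
  induction gs1 with
  | nil => intro cnt g _; simp [pvT]
  | cons hd tl ih =>
    obtain ⟨i, j⟩ := hd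
    intro cnt g h
    simp only [List.length_cons] at h
    have hlt : cnt + 1 < g := by omega
    rw [List.cons_append, pvT_cons, if_pos hlt, pvT_cons, if_pos hlt,
      ih (cnt + 1) g (by omega)]
    have hn : cnt + ((i, j) :: tl).length = cnt + 1 + tl.length := by simp; omega
    rw [hn]
    simp [List.append_assoc]

lemma pvOuter_spec (w : Nat) (rows : List (Int × String)) :
    ∀ cnt g s, cnt + (pvFlat w rows).length = g →
      pvOuter rows w cnt g s = s ++ pvT (pvFlat w rows) cnt g := by
  induction rows with
  | nil => intro cnt g s h; simp [pvOuter, pvFlat, pvT]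
  | cons hd tl ih =>
    obtain ⟨i, row⟩ := hd
    intro cnt g s h
    have hflat : pvFlat w ((i, row) :: tl) =
        pvRowGoals i (PySem.List.enumerate (row.toList.take w)) ++ pvFlat w tl := by
      simp [pvFlat]
    rw [hflat] at h ⊢
    have hle : cnt + (pvRowGoals i (PySem.List.enumerate (row.toList.take w))).length ≤ g := by
      simp at h; omega
    have hin := pvInner_spec i (PySem.List.enumerate (row.toList.take w)) cnt g s hle
    rw [pvOuter_cons, hin]
    by_cases hend : cnt + (pvRowGoals i (PySem.List.enumerate (row.toList.take w))).length = g
    · have h2 : pvFlat w tl = [] := by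
        have : (pvFlat w tl).length = 0 := by simp at h; omega
        exact List.length_eq_zero_iff.mp this
      simp [hend, h2]
    · have hlt : cnt + (pvRowGoals i (PySem.List.enumerate (row.toList.take w))).length < g :=
        lt_of_le_of_ne hle hend
      simp only [if_neg hend]
      rw [ih (cnt + (pvRowGoals i (PySem.List.enumerate (row.toList.take w))).length) g _
          (by simp at h ⊢; omega),
        pvT_append _ (pvFlat w tl) cnt g hlt]
      simp [List.append_assoc]

lemma pvCountRow (cs : List Char) :
    ∀ (i start : Int) (a : Nat),
      cs.foldl (fun a c => if pvIsGoal c then a + 1 else a) a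
        = a + (pvRowGoals i (PySem.List.enumerate cs start)).length := by
  induction cs with
  | nil => intro i start a; simp [pvRowGoals, PySem.List.enumerate_nil]
  | cons c tl ih =>
    intro i start a
    rw [PySem.List.enumerate_cons]
    by_cases hc : pvIsGoal c
    · simp only [List.foldl_cons, if_pos hc]
      rw [ih i (start + 1) (a + 1)]
      simp [pvRowGoals, hc]; omega
    · simp only [List.foldl_cons, if_neg hc]
      rw [ih i (start + 1) a]
      simp [pvRowGoals, hc]

lemma pvCount_spec (w : Nat) (rows : List String) :
    ∀ (start : Int) (a : Nat),
      rows.foldl (fun acc row =>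
          (row.toList.take w).foldl (fun a c => if pvIsGoal c then a + 1 else a) acc) a
        = a + (pvFlat w (PySem.List.enumerate rows start)).length := by
  induction rows with
  | nil => intro start a; simp [pvFlat, PySem.List.enumerate_nil]
  | cons r tl ih =>
    intro start a
    rw [PySem.List.enumerate_cons]
    simp only [List.foldl_cons, pvFlat, List.flatMap_cons, List.length_append]
    rw [pvCountRow (r.toList.take w) start 0 a, ih (start + 1)]
    simp [pvFlat]; omega

-- B's reverse fold over one row's cells is pvS over that row's goals
lemma pvRowB (i : Int) (cells : List (Int × Char)) (acc : List Char) :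
    (cells.reverse).foldl (pvCellB i) acc = pvS (pvRowGoals i cells) acc := by
  rw [List.foldl_reverse]
  induction cells with
  | nil => simp [pvRowGoals, pvS]
  | cons hd tl ih =>
    obtain ⟨j, c⟩ := hd
    by_cases hc : pvIsGoal c
    · simp only [List.foldr_cons, ih, pvRowGoals, List.filterMap_cons, hc, if_pos]
      simp [pvCellB, hc, pvS, pvPre]
    · simp only [List.foldr_cons, ih, pvRowGoals, List.filterMap_cons, hc]
      simp [pvCellB, hc]

-- B's whole double reverse fold is pvS over the flat goal list
lemma pvOuterB (w : Nat) (rows : List (Int × String)) (acc : List Char) :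
    (rows.reverse).foldl (fun acc p =>
        ((PySem.List.enumerate (p.2.toList.take w)).reverse).foldl (pvCellB p.1) acc) acc
      = pvS (pvFlat w rows) acc := by
  rw [List.foldl_reverse]
  simp only [pvRowB]
  induction rows generalizing acc with
  | nil => simp [pvFlat, pvS]
  | cons hd tl ih =>
    simp only [List.foldr_cons, ih]
    simp [pvFlat, pvS, List.foldr_append]

lemma pvS_ne_nil (gs : List (Int × Int)) (acc : List Char) (h : gs ≠ []) :
    pvS gs acc ≠ [] := by
  cases gs with
  | nil => exact absurd rfl h
  | cons x xs => simp [pvS, pvPre, pvEntry]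

-- the back-to-front accumulation renders the same string as A's counted pass
lemma pvS_eq_T (gs : List (Int × Int)) :
    ∀ cnt g, gs ≠ [] → cnt + gs.length = g → pvS gs [] = pvT gs cnt g := by
  induction gs with
  | nil => intro _ _ h _; exact absurd rfl h
  | cons hd tl ih =>
    obtain ⟨i, j⟩ := hd
    intro cnt g _ hsum
    cases tl with
    | nil =>
      have hnlt : ¬ cnt + 1 < g := by simp at hsum; omega
      rw [pvT_cons, if_neg hnlt]
      simp [pvS, pvPre]
    | cons y ys =>
      have hlt : cnt + 1 < g := by simp at hsum; omega
      have hne := pvS_ne_nil (y :: ys) [] (by simp)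
      have hih := ih (cnt + 1) g (by simp) (by simp at hsum ⊢; omega)
      rw [pvT_cons, if_pos hlt, ← hih]
      have hie : (pvS (y :: ys) []).isEmpty = false := by
        simp [hne]
      show pvPre (pvS (y :: ys) []) (i, j) = _
      simp [pvPre, hie]

-- ===== VERDICT (by name: the statement is the Claim_ definition above) =====
theorem solvability_condition_string_generator_spec : Claim_equal_solvability_condition_string_generator := by
  intro board _hdom _hpre
  unfold Spec_solvability_condition_string_generator
  unfold solvability_condition_string_generator solvability_condition_string_generator_alt
  cases board with
  | nil => decide
  | cons r rs =>
    simp only [List.length_cons, List.headD_cons, Nat.succ_ne_zero, if_false]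
    rw [pvCount_spec r.toList.length (r :: rs) 0 0,
      pvOuter_spec r.toList.length (PySem.List.enumerate (r :: rs)) 0 _ [] rfl,
      pvOuterB r.toList.length (PySem.List.enumerate (r :: rs)) []]
    cases hFc : pvFlat r.toList.length (PySem.List.enumerate (r :: rs)) with
    | nil => simp [pvT, pvS]
    | cons x xs =>
      rw [← hFc, pvS_eq_T (pvFlat r.toList.length (PySem.List.enumerate (r :: rs))) 0 _
          (by rw [hFc]; simp) rfl]
      simp
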